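-- pv_equiv track=rewrite | github.com/0HOON/Algorithm_Study | 프로그래머스/3/214289. 에어컨/에어컨.py | solution
-- ===== SOURCE A (Python) =====
-- def up_cost(temp, temperature, a):
--     if temp <= temperature:
--         return 0
--     else:
--         return a
--
-- def down_cost(temp, temperature, a):
--     if temp >= temperature:
--         return 0
--     else:
--         return a
--
-- def is_ok(temp, t1, t2):
--     return (temp <= t2) and (temp >= t1)
--
-- def solve(t, temp, memo, temperature, t1, t2, a, b, onboard):
--     if memo[t][temp] != -1:
--         return memo[t][temp]
--
--     if onboard[t] and not is_ok(temp, t1, t2):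
--         memo[t][temp] = 1000000
--         return memo[t][temp]
--
--     min_cost = solve(t-1, temp, memo, temperature, t1, t2, a, b, onboard) + (0 if temp == temperature else b)
--
--     if temp > 0:
--         min_cost = min(min_cost, solve(t-1, temp-1, memo, temperature, t1, t2, a, b, onboard) + up_cost(temp, temperature, a))
--
--     if temp < 50:
--         min_cost = min(min_cost, solve(t-1, temp+1, memo, temperature, t1, t2, a, b, onboard) + down_cost(temp, temperature, a))
--
--     memo[t][temp] = min_cost
--     return memo[t][temp]
--
-- def solution(temperature, t1, t2, a, b, onboard):
--     answer = 99999999999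
--     temperature += 10
--     t1 += 10
--     t2 += 10
--
--     if onboard[-1] == 0:
--         for i in range(1, len(onboard)):
--             if onboard[-i] == 1:
--                 onboard = onboard[:-i+1]
--                 break
--
--     memo = [[-1] * (51) for _ in range(len(onboard))]
--     for t in range(51):
--         if t == temperature:
--             memo[0][t] = 0
--         else:
--             memo[0][t] = 1000000
--
--     for temp in range(t1, t2+1):
--         answer = min(answer, solve(len(onboard)-1, temp, memo, temperature, t1, t2, a, b, onboard))
--
--     return answer
-- ===== SOURCE B (Python) =====
-- def _relax(dp, temp, temperature, a, b):
--     c = dp[temp] + (0 if temp == temperature else b)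
--     if temp > 0:
--         c = min(c, dp[temp - 1] + (0 if temp <= temperature else a))
--     if temp < 50:
--         c = min(c, dp[temp + 1] + (0 if temp >= temperature else a))
--     return c
--
-- def solution(temperature, t1, t2, a, b, onboard):
--     temperature += 10
--     t1 += 10
--     t2 += 10
--     # same preprocessing as the original: drop trailing zeros after the last passenger
--     if onboard[-1] == 0:
--         for i in range(1, len(onboard)):
--             if onboard[-i] == 1:
--                 onboard = onboard[:-i+1]
--                 break
--     dp = [0 if temp == temperature else 1000000 for temp in range(51)]
--     for t in range(1, len(onboard)):
--         dp = [1000000 if onboard[t] and not (t1 <= temp <= t2) else _relax(dp, temp, temperature, a, b)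
--               for temp in range(51)]
--     answer = 99999999999
--     for temp in range(t1, t2 + 1):
--         answer = min(answer, dp[temp])
--     return answer
-- ===== Notes on version B (the rewrite author's own statement) =====
-- stated objective: alternative
-- what changed: Replaced the memoized top-down recursion (solve + 2-D memo table) by an iterative bottom-up DP that keeps a single 51-entry rolling row, rebuilds it once per time step, and reads the answer off the final row.
-- outside the precondition, e.g. on solution(0, -15, -12, 3, 2, [0, 1, 0]): A returns 1000002, B returns 1000000; on solution(5, -11, -11, 1, 1, [0, 1]): A returns 1000001, B returns 1000000
import Mathlib
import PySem

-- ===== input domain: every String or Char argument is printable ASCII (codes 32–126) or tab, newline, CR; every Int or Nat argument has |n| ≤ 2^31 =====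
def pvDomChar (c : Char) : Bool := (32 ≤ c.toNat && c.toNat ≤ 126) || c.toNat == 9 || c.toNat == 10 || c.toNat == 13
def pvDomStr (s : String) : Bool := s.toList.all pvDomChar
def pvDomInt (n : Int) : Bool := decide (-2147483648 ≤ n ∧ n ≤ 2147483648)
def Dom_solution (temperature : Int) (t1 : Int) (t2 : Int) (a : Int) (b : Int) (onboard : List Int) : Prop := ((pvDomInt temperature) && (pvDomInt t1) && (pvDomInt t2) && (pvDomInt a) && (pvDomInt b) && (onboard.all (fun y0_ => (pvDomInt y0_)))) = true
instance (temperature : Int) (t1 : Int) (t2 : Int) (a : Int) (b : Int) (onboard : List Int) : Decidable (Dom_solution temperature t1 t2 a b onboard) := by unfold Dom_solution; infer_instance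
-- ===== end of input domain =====

-- B replaces A's memoized top-down recursion by a bottom-up row-by-row DP over the 51
-- temperature states (objective: alternative decomposition — one rolling row instead of a
-- 2-D memo table and recursion).

-- shared preprocessing: BOTH Python sources contain these identical lines
-- ("if onboard[-1] == 0: for i in range(1, len(onboard)): if onboard[-i] == 1: onboard = onboard[:-i+1]; break"),
-- so both ports use this one transliteration of them.
-- pyGet? …).getD 0 is exact here: Pre_ guarantees onboard ≠ [], and 1 ≤ i < len keeps -i in range.
def pyTrimLoop (ob : List Int) (i : Nat) : List Int :=
  if h : i < ob.length then
    if (PySem.List.pyGet? ob (-(i : Int))).getD 0 = 1 then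
      PySem.List.slice ob none (some (-(i : Int) + 1))
    else pyTrimLoop ob (i + 1)
  else ob
termination_by ob.length - i
decreasing_by omega

def pyTrim (ob : List Int) : List Int :=
  if (PySem.List.pyGet? ob (-1)).getD 0 = 0 then pyTrimLoop ob 1 else ob

-- ===== PORT A =====
def upCostA (temp tr a : Int) : Int := if temp ≤ tr then 0 else a

def downCostA (temp tr a : Int) : Int := if tr ≤ temp then 0 else a

-- solve(t, temp, memo, …): the memo table is threaded as a total function state
-- (Nat → Nat → Int); this is exact under Pre_, where every index read or written is the
-- in-range pair (t ≤ len(onboard)-1, temp ≤ 50) of the Python list-of-lists memo.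
-- At t = 0 row 0 is always pre-filled (≠ -1), so Python returns memo[0][temp]: the base case.
def solveA (tr u1 u2 a b : Int) (ob : List Int) : Nat → Nat → (Nat → Nat → Int) → Int × (Nat → Nat → Int)
  | 0, temp, memo => (memo 0 temp, memo)
  | t+1, temp, memo =>
    if memo (t+1) temp ≠ -1 then (memo (t+1) temp, memo)
    else if (PySem.List.pyGet? ob ((t : Int) + 1)).getD 0 ≠ 0 ∧ ¬((temp : Int) ≤ u2 ∧ u1 ≤ (temp : Int)) then
      (1000000, fun u v => if u = t+1 ∧ v = temp then 1000000 else memo u v)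
    else
      let r0 := solveA tr u1 u2 a b ob t temp memo
      let c1 := r0.1 + (if (temp : Int) = tr then 0 else b)
      let r1 := if 0 < temp then
          let s := solveA tr u1 u2 a b ob t (temp - 1) r0.2
          (min c1 (s.1 + upCostA (temp : Int) tr a), s.2)
        else (c1, r0.2)
      let r2 := if temp < 50 then
          let s := solveA tr u1 u2 a b ob t (temp + 1) r1.2
          (min r1.1 (s.1 + downCostA (temp : Int) tr a), s.2)
        else r1
      (r2.1, fun u v => if u = t+1 ∧ v = temp then r2.1 else r2.2 u v)

-- temp.toNat is exact here: Pre_ keeps every temp in range(t1, t2+1) inside [0, 50].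
def solution (temperature : Int) (t1 : Int) (t2 : Int) (a : Int) (b : Int) (onboard : List Int) : Int :=
  let tr := temperature + 10
  let u1 := t1 + 10
  let u2 := t2 + 10
  let ob := pyTrim onboard
  let memo0 : Nat → Nat → Int := fun u v => if u = 0 then (if (v : Int) = tr then 0 else 1000000) else -1
  let res := (PySem.List.pyRange u1 (u2 + 1) 1).foldl
      (fun st temp =>
        let s := solveA tr u1 u2 a b ob (ob.length - 1) temp.toNat st.2
        (min st.1 s.1, s.2))
      ((99999999999 : Int), memo0)
  res.1

-- ===== PORT B =====
-- _relax(dp, temp, temperature, a, b): the three DP transition sources.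
-- dp has length 51 and 0 ≤ temp ≤ 50 guarded, so (pyGet? …).getD 0 is exact.
def relaxB (dp : List Int) (temp tr a b : Int) : Int :=
  let c := (PySem.List.pyGet? dp temp).getD 0 + (if temp = tr then 0 else b)
  let c := if 0 < temp then
      min c ((PySem.List.pyGet? dp (temp - 1)).getD 0 + (if temp ≤ tr then 0 else a))
    else c
  if temp < 50 then
    min c ((PySem.List.pyGet? dp (temp + 1)).getD 0 + (if tr ≤ temp then 0 else a))
  else c

-- one iteration of the row loop: the list comprehension over range(51)
def stepB (tr u1 u2 a b : Int) (ob : List Int) (dp : List Int) (t : Int) : List Int :=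
  (PySem.List.pyRange 0 51 1).map (fun temp =>
    if (PySem.List.pyGet? ob t).getD 0 ≠ 0 ∧ ¬(u1 ≤ temp ∧ temp ≤ u2) then 1000000
    else relaxB dp temp tr a b)

-- final dp[temp] read: exact under Pre_ (temp ∈ [0, 50], dp of length 51)
def solution_alt (temperature : Int) (t1 : Int) (t2 : Int) (a : Int) (b : Int) (onboard : List Int) : Int :=
  let tr := temperature + 10
  let u1 := t1 + 10
  let u2 := t2 + 10
  let ob := pyTrim onboard
  let dp0 := (PySem.List.pyRange 0 51 1).map (fun temp => if temp = tr then 0 else 1000000)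
  let dpF := (PySem.List.pyRange 1 (ob.length : Int) 1).foldl (stepB tr u1 u2 a b ob) dp0
  (PySem.List.pyRange u1 (u2 + 1) 1).foldl
    (fun ans temp => min ans ((PySem.List.pyGet? dpF temp).getD 0)) 99999999999

-- ===== PRECONDITION & SPEC =====
-- Pre_ excludes: (a) onboard = [] and the out-of-range bands t1 ≤ t2 with t1 < -61 or 40 < t2,
-- where both Pythons raise IndexError; (b) the band -61 ≤ t1 < -10 with t1 ≤ t2 ≤ 40, where the
-- answer loop reads the table through Python negative-index wraparound and each program returns an
-- accidental, layout-dependent value no caller would specify (see claim cites).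
def Pre_solution (temperature : Int) (t1 : Int) (t2 : Int) (a : Int) (b : Int) (onboard : List Int) : Prop :=
  onboard ≠ [] ∧ (t2 < t1 ∨ (-10 ≤ t1 ∧ t2 ≤ 40))
instance (temperature : Int) (t1 : Int) (t2 : Int) (a : Int) (b : Int) (onboard : List Int) : Decidable (Pre_solution temperature t1 t2 a b onboard) := by unfold Pre_solution; infer_instance

def pvWitness_solution : Int × Int × Int × Int × Int × List Int := (23, 18, 25, 5, 1, [0, 1, 0, 1, 0])

def Spec_solution (temperature : Int) (t1 : Int) (t2 : Int) (a : Int) (b : Int) (onboard : List Int) (out : Int) : Prop := out = solution_alt temperature t1 t2 a b onboard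
instance (temperature : Int) (t1 : Int) (t2 : Int) (a : Int) (b : Int) (onboard : List Int) (out : Int) : Decidable (Spec_solution temperature t1 t2 a b onboard out) := by unfold Spec_solution; infer_instance

-- ===== CLAIM (what is proved, stated in full; the proofs are below) =====
def Claim_equal_solution : Prop := ∀ (temperature : Int) (t1 : Int) (t2 : Int) (a : Int) (b : Int) (onboard : List Int), Dom_solution temperature t1 t2 a b onboard → Pre_solution temperature t1 t2 a b onboard → Spec_solution temperature t1 t2 a b onboard (solution temperature t1 t2 a b onboard)

-- ===== LEMMAS AND PROOFS =====

-- the mathematical DP value both programs compute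
def dpV (tr u1 u2 a b : Int) (ob : List Int) : Nat → Nat → Int
  | 0, temp => if (temp : Int) = tr then 0 else 1000000
  | t+1, temp =>
    if (PySem.List.pyGet? ob ((t : Int) + 1)).getD 0 ≠ 0 ∧ ¬((temp : Int) ≤ u2 ∧ u1 ≤ (temp : Int)) then 1000000
    else
      let c1 := dpV tr u1 u2 a b ob t temp + (if (temp : Int) = tr then 0 else b)
      let c2 := if 0 < temp then min c1 (dpV tr u1 u2 a b ob t (temp - 1) + upCostA (temp : Int) tr a) else c1
      if temp < 50 then min c2 (dpV tr u1 u2 a b ob t (temp + 1) + downCostA (temp : Int) tr a) else c2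

-- A's memo invariant: row 0 is filled with the true values, every entry is -1 or true
def MemoOK (tr u1 u2 a b : Int) (ob : List Int) (m : Nat → Nat → Int) : Prop :=
  (∀ v, m 0 v = dpV tr u1 u2 a b ob 0 v) ∧
  (∀ t v, m t v = -1 ∨ m t v = dpV tr u1 u2 a b ob t v)

theorem memoOK_update (tr u1 u2 a b : Int) (ob : List Int) (m : Nat → Nat → Int)
    (t temp : Nat) (x : Int) (hm : MemoOK tr u1 u2 a b ob m)
    (hx : x = dpV tr u1 u2 a b ob (t+1) temp) :
    MemoOK tr u1 u2 a b ob (fun u v => if u = t+1 ∧ v = temp then x else m u v) := by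
  obtain ⟨h0, h⟩ := hm
  refine ⟨fun v => ?_, fun u v => ?_⟩
  · show (if (0 = t+1 ∧ v = temp) then x else m 0 v) = _
    rw [if_neg (by omega)]; exact h0 v
  · by_cases hc : u = t+1 ∧ v = temp
    · right
      show (if (u = t+1 ∧ v = temp) then x else m u v) = dpV tr u1 u2 a b ob u v
      rw [if_pos hc, hx, hc.1, hc.2]
    · rw [show (fun u v => if u = t+1 ∧ v = temp then x else m u v) u v = m u v from by simp [hc]]
      exact h u v

theorem solveA_ok (tr u1 u2 a b : Int) (ob : List Int) :
    ∀ (t temp : Nat) (m : Nat → Nat → Int), MemoOK tr u1 u2 a b ob m →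
      (solveA tr u1 u2 a b ob t temp m).1 = dpV tr u1 u2 a b ob t temp ∧
      MemoOK tr u1 u2 a b ob (solveA tr u1 u2 a b ob t temp m).2 := by
  intro t
  induction t with
  | zero => intro temp m hm; exact ⟨hm.1 temp, hm⟩
  | succ t ih =>
    intro temp m hm
    rw [solveA]
    by_cases h1 : m (t+1) temp = -1
    case neg =>
      rw [if_pos h1]
      refine ⟨?_, hm⟩
      rcases hm.2 (t+1) temp with h | h
      · exact absurd h h1
      · exact h
    case pos =>
      rw [if_neg (by simpa using h1)]
      by_cases h2 : (PySem.List.pyGet? ob ((t : Int) + 1)).getD 0 ≠ 0 ∧ ¬((temp : Int) ≤ u2 ∧ u1 ≤ (temp : Int))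
      · rw [if_pos h2]
        have hv : dpV tr u1 u2 a b ob (t+1) temp = 1000000 := by rw [dpV, if_pos h2]
        exact ⟨hv.symm, memoOK_update _ _ _ _ _ _ _ _ _ _ ⟨hm.1, hm.2⟩ hv.symm⟩
      · rw [if_neg h2]
        obtain ⟨e0, k0⟩ := ih temp m hm
        have hv : dpV tr u1 u2 a b ob (t+1) temp =
            (let c1 := dpV tr u1 u2 a b ob t temp + (if (temp : Int) = tr then 0 else b)
             let c2 := if 0 < temp then min c1 (dpV tr u1 u2 a b ob t (temp - 1) + upCostA (temp : Int) tr a) else c1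
             if temp < 50 then min c2 (dpV tr u1 u2 a b ob t (temp + 1) + downCostA (temp : Int) tr a) else c2) := by
          rw [dpV, if_neg h2]
        by_cases hp : 0 < temp <;> by_cases hq : temp < 50 <;>
          simp only [hp, hq, if_true, if_false, reduceIte, e0, if_pos, if_neg,
            not_false_eq_true, not_true_eq_false] at hv ⊢
        · obtain ⟨e1, k1⟩ := ih (temp - 1) _ k0
          obtain ⟨e2, k2⟩ := ih (temp + 1) _ k1
          simp only [e1, e2]
          exact ⟨hv.symm, memoOK_update _ _ _ _ _ _ _ _ _ _ k2 hv.symm⟩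
        · obtain ⟨e1, k1⟩ := ih (temp - 1) _ k0
          simp only [e1]
          exact ⟨hv.symm, memoOK_update _ _ _ _ _ _ _ _ _ _ k1 hv.symm⟩
        · obtain ⟨e2, k2⟩ := ih (temp + 1) _ k0
          simp only [e2]
          exact ⟨hv.symm, memoOK_update _ _ _ _ _ _ _ _ _ _ k2 hv.symm⟩
        · exact ⟨hv.symm, memoOK_update _ _ _ _ _ _ _ _ _ _ k0 hv.symm⟩

-- B's row t as a list
def rowV (tr u1 u2 a b : Int) (ob : List Int) (t : Nat) : List Int :=
  (PySem.List.pyRange 0 51 1).map (fun temp => dpV tr u1 u2 a b ob t temp.toNat)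

theorem rowV_get (tr u1 u2 a b : Int) (ob : List Int) (t k : Nat) (hk : k < 51) :
    (PySem.List.pyGet? (rowV tr u1 u2 a b ob t) (k : Int)).getD 0 = dpV tr u1 u2 a b ob t k := by
  rw [rowV, PySem.List.pyGet?_natCast, show (51 : Int) = ((51 : Nat) : Int) from by norm_num,
    PySem.List.getElem?_map_pyRange_zero _ _ _ hk]
  simp

theorem stepB_row (tr u1 u2 a b : Int) (ob : List Int) (t : Nat) :
    stepB tr u1 u2 a b ob (rowV tr u1 u2 a b ob t) ((t : Int) + 1) = rowV tr u1 u2 a b ob (t+1) := by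
  rw [stepB]
  conv_rhs => rw [rowV]
  refine List.map_congr_left (fun temp hmem => ?_)
  rw [PySem.List.mem_pyRange_one] at hmem
  obtain ⟨h0, h51⟩ := hmem
  obtain ⟨k, rfl⟩ : ∃ k : Nat, temp = (k : Int) := ⟨temp.toNat, (Int.toNat_of_nonneg h0).symm⟩
  have hk : k < 51 := by exact_mod_cast h51
  have g0 := rowV_get tr u1 u2 a b ob t k hk
  simp only [Int.toNat_natCast]
  rw [dpV]
  by_cases hg : (PySem.List.pyGet? ob ((t : Int) + 1)).getD 0 ≠ 0 ∧ ¬((k : Int) ≤ u2 ∧ u1 ≤ (k : Int))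
  · rw [if_pos ⟨hg.1, fun h => hg.2 ⟨h.2, h.1⟩⟩, if_pos hg]
  · have hg' : ¬((PySem.List.pyGet? ob ((t : Int) + 1)).getD 0 ≠ 0 ∧ ¬(u1 ≤ (k : Int) ∧ (k : Int) ≤ u2)) :=
      fun h => hg ⟨h.1, fun h2 => h.2 ⟨h2.2, h2.1⟩⟩
    rw [if_neg hg', if_neg hg]
    simp only [relaxB, upCostA, downCostA]
    by_cases hp : 0 < k <;> by_cases hq : k < 50
    · have hpI : (0 : Int) < (k : Int) := by exact_mod_cast hp
      have hqI : ((k : Int)) < 50 := by exact_mod_cast hq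
      have g1c : ((k : Int) - 1) = ((k - 1 : Nat) : Int) := by omega
      have g2c : ((k : Int) + 1) = ((k + 1 : Nat) : Int) := by omega
      have e1 := rowV_get tr u1 u2 a b ob t (k - 1) (by omega)
      have e2 := rowV_get tr u1 u2 a b ob t (k + 1) (by omega)
      rw [g1c, g2c, g0, e1, e2, if_pos hpI, if_pos hqI, if_pos hp, if_pos hq]
    · have hpI : (0 : Int) < (k : Int) := by exact_mod_cast hp
      have hqI : ¬(((k : Int)) < 50) := by exact_mod_cast hq
      have g1c : ((k : Int) - 1) = ((k - 1 : Nat) : Int) := by omega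
      have e1 := rowV_get tr u1 u2 a b ob t (k - 1) (by omega)
      rw [g1c, g0, e1, if_pos hpI, if_neg hqI, if_pos hp, if_neg hq]
    · have hpI : ¬((0 : Int) < (k : Int)) := by exact_mod_cast hp
      have hqI : ((k : Int)) < 50 := by exact_mod_cast hq
      have g2c : ((k : Int) + 1) = ((k + 1 : Nat) : Int) := by omega
      have e2 := rowV_get tr u1 u2 a b ob t (k + 1) (by omega)
      rw [g2c, g0, e2, if_neg hpI, if_pos hqI, if_neg hp, if_pos hq]
    · have hpI : ¬((0 : Int) < (k : Int)) := by exact_mod_cast hp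
      have hqI : ¬(((k : Int)) < 50) := by exact_mod_cast hq
      rw [g0, if_neg hpI, if_neg hqI, if_neg hp, if_neg hq]

theorem foldB_rows (tr u1 u2 a b : Int) (ob : List Int) :
    ∀ (L : Nat),
      (PySem.List.pyRange 1 (L : Int) 1).foldl (stepB tr u1 u2 a b ob)
        (rowV tr u1 u2 a b ob 0) = rowV tr u1 u2 a b ob (L - 1) := by
  intro L
  induction L with
  | zero => rw [PySem.List.pyRange_one_eq_nil (by omega)]; rfl
  | succ L ih =>
    by_cases hL : L = 0
    · subst hL; rw [PySem.List.pyRange_one_eq_nil (by omega)]; rfl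
    · have : ((L + 1 : Nat) : Int) = (L : Int) + 1 := by push_cast; ring
      rw [this, PySem.List.pyRange_one_succ_right (by omega), List.foldl_append, ih]
      simp only [List.foldl_cons, List.foldl_nil]
      have hL1 : (L : Int) = ((L - 1 : Nat) : Int) + 1 := by omega
      rw [hL1, stepB_row]
      congr 1
      omega

-- the two answer loops agree, threading A's memo invariant
theorem final_fold (tr u1 u2 a b : Int) (ob : List Int) (T : Nat) :
    ∀ (ts : List Int), (∀ temp ∈ ts, 0 ≤ temp ∧ temp < 51) →
    ∀ (ans : Int) (m : Nat → Nat → Int), MemoOK tr u1 u2 a b ob m →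
      (ts.foldl (fun st temp =>
          let s := solveA tr u1 u2 a b ob T temp.toNat st.2
          (min st.1 s.1, s.2)) (ans, m)).1 =
      ts.foldl (fun ans temp =>
          min ans ((PySem.List.pyGet? (rowV tr u1 u2 a b ob T) temp).getD 0)) ans := by
  intro ts
  induction ts with
  | nil => intro _ ans m _; rfl
  | cons temp ts ih =>
    intro hmem ans m hm
    obtain ⟨h0, h51⟩ := hmem temp (List.mem_cons_self)
    obtain ⟨e, k⟩ := solveA_ok tr u1 u2 a b ob T temp.toNat m hm
    simp only [List.foldl_cons]
    rw [ih (fun x hx => hmem x (List.mem_cons_of_mem _ hx)) _ _ k]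
    have : (PySem.List.pyGet? (rowV tr u1 u2 a b ob T) temp).getD 0 = dpV tr u1 u2 a b ob T temp.toNat := by
      have := rowV_get tr u1 u2 a b ob T temp.toNat (by omega)
      rwa [Int.toNat_of_nonneg h0] at this
    rw [this, e]

-- ===== VERDICT (by name: the statement is the Claim_ definition above) =====
theorem solution_spec : Claim_equal_solution := by
  intro temperature t1 t2 a b onboard _ hpre
  unfold Spec_solution solution solution_alt
  simp only []
  set tr := temperature + 10 with htr
  set u1 := t1 + 10 with hu1
  set u2 := t2 + 10 with hu2
  set ob := pyTrim onboard with hob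
  -- B's initial row is rowV 0
  have hinit : (PySem.List.pyRange 0 51 1).map (fun temp => if temp = tr then 0 else 1000000)
      = rowV tr u1 u2 a b ob 0 := by
    rw [rowV]
    refine List.map_congr_left (fun temp hmem => ?_)
    rw [PySem.List.mem_pyRange_one] at hmem
    rw [dpV, Int.toNat_of_nonneg hmem.1]
  rw [hinit, foldB_rows]
  -- every temp the answer loop visits lies in [0, 51)
  have hrange : ∀ temp ∈ PySem.List.pyRange u1 (u2 + 1) 1, 0 ≤ temp ∧ temp < 51 := by
    intro temp hmem
    rw [PySem.List.mem_pyRange_one] at hmem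
    rcases hpre.2 with h | h
    · exfalso; omega
    · omega
  -- A's initial memo satisfies the invariant
  have hmemo : MemoOK tr u1 u2 a b ob (fun u v => if u = 0 then (if (v : Int) = tr then 0 else 1000000) else -1) := by
    constructor
    · intro v; rw [dpV]; simp
    · intro t v
      cases t with
      | zero => right; rw [dpV]; simp
      | succ t => left; simp
  exact final_fold tr u1 u2 a b ob (ob.length - 1) _ hrange 99999999999 _ hmemo
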